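-- pv_equiv track=rewrite | github.com/mattmerrick/llmlogs | scripts/fetch_rules.py | convert_rule_content
-- ===== SOURCE A (Python) =====
-- def convert_rule_content(content: str) -> str:
--     """Convert rule content to HTML sections"""
--     sections = []
--     current_section = {"title": "", "items": []}
--
--     lines = content.split('\n')
--     for line in lines:
--         line = line.strip()
--         if line.startswith('##'):
--             if current_section["title"]:
--                 sections.append(current_section)
--             current_section = {"title": line[2:].strip(), "items": []}
--         elif line.startswith('- '):
--             current_section["items"].append(line[2:])
--
--     if current_section["title"]:
--         sections.append(current_section)
--
--     html = ""
--     for section in sections: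
--         html += f"""
--             <section class="rule-section">
--                 <h2>{section['title']}</h2>
--                 <ul>
--                     {''.join(f'<li>{item}</li>' for item in section['items'])}
--                 </ul>
--             </section>
--         """
--
--     return html
-- ===== SOURCE B (Python) =====
-- def convert_rule_content(content: str) -> str:
--     """Single pass: flush each section's HTML as soon as the next heading starts."""
--     html = ""
--     title = ""
--     items = []
--
--     def flushed(h, t, its):
--         if not t:
--             return h
--         return h + f"""
--             <section class="rule-section">
--                 <h2>{t}</h2>
--                 <ul>
--                     {''.join(f'<li>{item}</li>' for item in its)}
--                 </ul>
--             </section>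
--         """
--
--     for raw in content.split('\n'):
--         line = raw.strip()
--         if line.startswith('##'):
--             html = flushed(html, title, items)
--             title = line[2:].strip()
--             items = []
--         elif line.startswith('- '):
--             items.append(line[2:])
--     return flushed(html, title, items)
-- ===== Notes on version B (the rewrite author's own statement) =====
-- stated objective: simpler
-- what changed: Replaced the two-pass design (collect a list of section dicts, then render them in a second loop) by a single pass that flushes each completed section's HTML immediately, dropping the intermediate list entirely.
import Mathlib
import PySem

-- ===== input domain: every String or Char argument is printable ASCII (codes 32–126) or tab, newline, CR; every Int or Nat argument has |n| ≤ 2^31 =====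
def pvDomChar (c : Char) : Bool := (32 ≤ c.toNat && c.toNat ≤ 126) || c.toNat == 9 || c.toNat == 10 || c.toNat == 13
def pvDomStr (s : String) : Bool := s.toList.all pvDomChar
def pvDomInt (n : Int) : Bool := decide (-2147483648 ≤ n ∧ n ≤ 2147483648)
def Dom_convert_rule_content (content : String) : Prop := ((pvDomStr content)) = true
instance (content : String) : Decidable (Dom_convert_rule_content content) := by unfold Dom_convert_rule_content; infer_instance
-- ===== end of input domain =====

-- B is a one-pass version: it renders each section's HTML at flush time instead of
-- collecting a list of sections and rendering in a second loop (objective: simpler).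

-- ===== PORT A =====
-- A's collection loop: state = (sections, (current title, current items))
def pvStepA (st : List (String × List String) × (String × List String)) (rawline : String) :
    List (String × List String) × (String × List String) :=
  let line := PySem.Str.strip rawline
  if PySem.Str.startswith line "##" then
    let sections := if st.2.1 = "" then st.1 else st.1 ++ [st.2]
    (sections, (PySem.Str.strip (PySem.Str.slice line (some 2) none), []))
  else if PySem.Str.startswith line "- " then
    (st.1, (st.2.1, st.2.2 ++ [PySem.Str.slice line (some 2) none]))
  else st

-- A's render loop body: html += <section template>
def pvRenderStep (html : String) (sec : String × List String) : String :=
  html ++ "\n            <section class=\"rule-section\">\n                <h2>" ++ sec.1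
       ++ "</h2>\n                <ul>\n                    "
       ++ PySem.Str.join "" (sec.2.map fun item => "<li>" ++ item ++ "</li>")
       ++ "\n                </ul>\n            </section>\n        "

def convert_rule_content (content : String) : String :=
  let lines := (PySem.Str.split? content "\n").getD []   -- sep ≠ "", so split? is always some
  let fin := lines.foldl pvStepA ([], ("", []))
  let sections := if fin.2.1 = "" then fin.1 else fin.1 ++ [fin.2]
  sections.foldl pvRenderStep ""

-- ===== PORT B =====
-- B's flush helper: append the section template unless the title is empty
def pvFlushed (html : String) (title : String) (items : List String) : String :=
  if title = "" then html
  else html ++ "\n            <section class=\"rule-section\">\n                <h2>" ++ title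
       ++ "</h2>\n                <ul>\n                    "
       ++ PySem.Str.join "" (items.map fun item => "<li>" ++ item ++ "</li>")
       ++ "\n                </ul>\n            </section>\n        "

-- B's single loop: state = (html so far, current title, current items)
def pvStepB (st : String × String × List String) (raw : String) : String × String × List String :=
  let line := PySem.Str.strip raw
  if PySem.Str.startswith line "##" then
    (pvFlushed st.1 st.2.1 st.2.2, PySem.Str.strip (PySem.Str.slice line (some 2) none), [])
  else if PySem.Str.startswith line "- " then
    (st.1, st.2.1, st.2.2 ++ [PySem.Str.slice line (some 2) none])
  else st

def convert_rule_content_alt (content : String) : String :=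
  let fin := ((PySem.Str.split? content "\n").getD []).foldl pvStepB ("", "", [])
  pvFlushed fin.1 fin.2.1 fin.2.2

-- ===== PRECONDITION & SPEC =====
def Spec_convert_rule_content (content : String) (out : String) : Prop := out = convert_rule_content_alt content
instance (content : String) (out : String) : Decidable (Spec_convert_rule_content content out) := by unfold Spec_convert_rule_content; infer_instance

-- ===== CLAIM (what is proved, stated in full; the proofs are below) =====
def Claim_equal_convert_rule_content : Prop := ∀ (content : String), Dom_convert_rule_content content → Spec_convert_rule_content content (convert_rule_content content)

-- ===== LEMMAS AND PROOFS =====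

-- rendering A's flushed section list = B's flush of the rendered prefix
theorem pvFlushed_eq (html : String) (cur : String × List String) (secs : List (String × List String)) :
    pvFlushed (secs.foldl pvRenderStep html) cur.1 cur.2
      = (if cur.1 = "" then secs else secs ++ [cur]).foldl pvRenderStep html := by
  by_cases h : cur.1 = "" <;> simp [pvFlushed, h, pvRenderStep]

-- loop invariant: B's state tracks (render of A's sections, A's current section)
theorem pv_loop (lines : List String) (html : String) :
    ∀ (secs : List (String × List String)) (cur : String × List String),
    lines.foldl pvStepB (secs.foldl pvRenderStep html, cur)
      = ((lines.foldl pvStepA (secs, cur)).1.foldl pvRenderStep html,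
         (lines.foldl pvStepA (secs, cur)).2) := by
  induction lines with
  | nil => intro secs cur; rfl
  | cons l rest ih =>
    intro secs cur
    simp only [List.foldl_cons]
    show rest.foldl pvStepB (pvStepB (secs.foldl pvRenderStep html, cur) l) = _
    unfold pvStepB pvStepA
    by_cases h1 : PySem.Str.startswith (PySem.Str.strip l) "##"
    · simp only [h1, if_true]
      rw [pvFlushed_eq html cur secs]
      exact ih _ _
    · by_cases h2 : PySem.Str.startswith (PySem.Str.strip l) "- "
      · simp only [h1, h2]
        exact ih secs (cur.1, cur.2 ++ [PySem.Str.slice (PySem.Str.strip l) (some 2) none])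
      · simp only [h1, h2]
        exact ih secs cur

-- ===== VERDICT (by name: the statement is the Claim_ definition above) =====
theorem convert_rule_content_spec : Claim_equal_convert_rule_content := by
  intro content _
  unfold Spec_convert_rule_content convert_rule_content convert_rule_content_alt
  have h := pv_loop ((PySem.Str.split? content "\n").getD []) "" [] ("", [])
  simp only [List.foldl_nil] at h
  rw [h, pvFlushed_eq]
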